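-- pv_equiv track=rewrite | github.com/gakukuriu/ManyToOneSAT | manyToOneSat.py | iVariantsForHospitals_R
-- ===== SOURCE A (Python) =====
-- from math import factorial
-- from itertools import permutations
-- from itertools import chain,combinations
--
-- def powerset(iterable):  # takes an iterable object and returns an iterable object consisting of the power set of that element
--     "powerset([1,2,3]) --> () (1,) (2,) (3,) (1,2) (1,3) (2,3) (1,2,3)"
--     s = list(iterable)
--     return chain.from_iterable(combinations(s, r) for r in range(len(s)+1))
--
-- n = 2
--
-- m = 2
--
-- def allInternsIndices():
--     return range(m)
--
-- def allHospitalsPreferences():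
--     return range(factorial(2 ** m))
--
-- def responsiveCondition(J_index, prList):  # check whether the preference relation prList satisfies the responsible condition for a subset J of the set of all interns.
--     powerI_index = 2**m - 1
--     powerI = list(powerset(range(m)))
--     J = powerI[J_index]
--     IminusJ = powerI[powerI_index-J_index]
--     for i in IminusJ:
--         Jplusi = tuple(sorted(J + (i,)))
--         if (prList.index(Jplusi) < prList.index(J)):
--             if prList.index(()) < prList.index((i,)):
--                 return False
--         if prList.index((i,)) < prList.index(()):
--             if prList.index(J) < prList.index(Jplusi):
--                 return False
--         for j in IminusJ:
--             if i != j: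
--                 Jplusj = tuple(sorted(J + (j,)))
--                 if prList.index(Jplusi) < prList.index(Jplusj):
--                     if prList.index((j,)) < prList.index((i,)):
--                         return False
--                 if prList.index((i,)) < prList.index((j,)):
--                     if prList.index(Jplusj) < prList.index(Jplusi):
--                         return False
--     return True
--
-- def responsivePref(prList):  # check whether preference list prList is responsive
--     allJ = 2 ** m
--     for j in range(allJ):
--         if not(responsiveCondition(j, prList)):
--             return False
--     return True
--
-- def allHospitalsResponsivePreferences():  # return all responsive preferences of hospitals
--     ans = []
--     preflists = list(permutations(range(2**m)))
--     pw = list(powerset(allInternsIndices()))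
--     for p in allHospitalsPreferences():
--         prefList = [pw[i] for i in preflists[p]]
--         if responsivePref(prefList):
--             ans.append(p)
--     return (range(len(ans)), ans)
--
-- def allHospitalsResponsiveProfiles(): # return all responsive profiles of hospitals
--     _, y = allHospitalsResponsivePreferences()
--     return (range(len(y) ** n), y)
--
-- def hospitalsPrefId_R(i, p):  # extract the preference of hospital i from the hospital's responsive profile p in index format
--     _, y = allHospitalsResponsivePreferences()
--     base = len(y)
--     y_ind = ( p % (base ** (i+1)) ) // (base ** i)
--     return y_ind
--
-- def hospitalsPreferences_R(condition):
--     allHPrange, _ = allHospitalsResponsivePreferences()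
--     return [x for x in allHPrange if condition(x)]
--
-- def iVariantsForHospitals_R(i, p):  # return i-variants of the hosputal's responsive profile p
--     _, y = allHospitalsResponsiveProfiles()
--     currpref = hospitalsPrefId_R(i, p)
--     factor = len(y) ** i
--     rest = p - currpref * factor
--     variants = []
--     for newpref in hospitalsPreferences_R(lambda newpref: newpref != currpref):
--         variants.append(rest + newpref * factor)
--     return variants
-- ===== SOURCE B (Python) =====
-- def iVariantsForHospitals_R(i, p):  # digit-peeling: strip the i low base-8 digits, vary the exposed digit over its 8-window, then push the digits back
--     tail = []
--     q = p
--     for _ in range(i):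
--         tail.append(q % 8)
--         q //= 8
--     lo = q - q % 8
--     variants = [v for v in range(lo, lo + 8) if v != q]
--     for d in reversed(tail):
--         variants = [v * 8 + d for v in variants]
--     return variants
-- ===== Notes on version B (the rewrite author's own statement) =====
-- stated objective: alternative
-- what changed: B replaces A's per-call rebuild of the responsive-preference list (permutations + powerset + responsiveness checks with repeated list.index scans) and its power/modular digit extraction by a digit-peeling loop: it strips the i low base-8 digits into a list, enumerates the 8-aligned window around the exposed value excluding it, and rebuilds the variants by pushing the peeled digits back, never computing a power; much cheaper for ordinary i but bit-quadratic for astronomically large i.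
-- outside the precondition, e.g. on iVariantsForHospitals_R(-1, 5): A returns [5.125, 5.25, 5.375, 5.5, 5.625, 5.75, 5.875], B returns [0, 1, 2, 3, 4, 6, 7]
import Mathlib
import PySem

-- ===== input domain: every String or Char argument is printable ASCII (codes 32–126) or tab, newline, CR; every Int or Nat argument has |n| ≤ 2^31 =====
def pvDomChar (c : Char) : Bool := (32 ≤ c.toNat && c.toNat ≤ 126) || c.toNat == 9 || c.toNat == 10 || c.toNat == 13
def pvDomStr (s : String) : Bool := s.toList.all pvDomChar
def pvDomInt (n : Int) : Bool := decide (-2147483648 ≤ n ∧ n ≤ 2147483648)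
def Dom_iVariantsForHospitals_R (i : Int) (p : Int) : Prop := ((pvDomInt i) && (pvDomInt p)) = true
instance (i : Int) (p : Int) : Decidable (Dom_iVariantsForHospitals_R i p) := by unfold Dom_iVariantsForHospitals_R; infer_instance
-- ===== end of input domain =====

-- B replaces A's per-call rebuild of the responsive-preference list (permutations + powerset +
-- responsiveness checks) by a digit-peeling loop: strip the i low base-8 digits, vary the exposed
-- digit over its aligned 8-window, push the digits back (alternative decomposition, no powers);
-- equality is proved for i ≥ 0 (Pre_).


-- ===== PORT A =====
-- prList.index(t): on the constant data A feeds it, t is always present, so the default 0 is never used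
def pyIndexD (xs : List (List Int)) (v : List Int) : Nat := (PySem.List.index? xs v).getD 0

-- powerset(iterable) = chain.from_iterable(combinations(s, r) for r in range(len(s)+1))
def powersetP (s : List Int) : List (List Int) :=
  (List.range (s.length + 1)).flatMap (fun r => PySem.List.combinations s r)

-- responsiveCondition(J_index, prList); the early-return-False loops become List.all over the same elements
def responsiveConditionP (Jidx : Int) (prList : List (List Int)) : Bool :=
  let powerIindex : Int := 2 ^ 2 - 1                    -- 2**m - 1, m = 2
  let powerI := powersetP (PySem.List.pyRange 0 2 1)    -- list(powerset(range(m)))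
  let J := PySem.List.pyGetD powerI Jidx []
  let IminusJ := PySem.List.pyGetD powerI (powerIindex - Jidx) []
  IminusJ.all (fun i =>
    let Jplusi := PySem.List.sorted (J ++ [i]) (fun x => x) false
    (!(decide (pyIndexD prList Jplusi < pyIndexD prList J) &&
       decide (pyIndexD prList [] < pyIndexD prList [i]))) &&
    (!(decide (pyIndexD prList [i] < pyIndexD prList []) &&
       decide (pyIndexD prList J < pyIndexD prList Jplusi))) &&
    IminusJ.all (fun j =>
      if i ≠ j then
        let Jplusj := PySem.List.sorted (J ++ [j]) (fun x => x) false
        (!(decide (pyIndexD prList Jplusi < pyIndexD prList Jplusj) &&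
           decide (pyIndexD prList [j] < pyIndexD prList [i]))) &&
        (!(decide (pyIndexD prList [i] < pyIndexD prList [j]) &&
           decide (pyIndexD prList Jplusj < pyIndexD prList Jplusi)))
      else true))

-- responsivePref(prList): for j in range(2**m): if not responsiveCondition(j, prList): return False
def responsivePrefP (prList : List (List Int)) : Bool :=
  (PySem.List.pyRange 0 (2 ^ 2) 1).all (fun j => responsiveConditionP j prList)

-- allHospitalsResponsivePreferences()
def allHospitalsResponsivePreferencesP : List Int × List Int :=
  let preflists := PySem.List.permutations (PySem.List.pyRange 0 (2 ^ 2) 1) 4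
  let pw := powersetP (PySem.List.pyRange 0 2 1)        -- powerset(allInternsIndices())
  let ans := (PySem.List.pyRange 0 ((Nat.factorial (2 ^ 2) : Nat) : Int) 1).foldl
    (fun ans p =>
      let prefList := (PySem.List.pyGetD preflists p []).map (fun idx => PySem.List.pyGetD pw idx [])
      if responsivePrefP prefList then ans ++ [p] else ans) []
  (PySem.List.pyRange 0 ((ans.length : Nat) : Int) 1, ans)

-- allHospitalsResponsiveProfiles()
def allHospitalsResponsiveProfilesP : List Int × List Int :=
  let y := allHospitalsResponsivePreferencesP.2
  (PySem.List.pyRange 0 (((y.length : Nat) : Int) ^ 2) 1, y)   -- range(len(y) ** n), n = 2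

-- hospitalsPrefId_R(i, p); base ** k via .toNat: exact for 0 ≤ i (Python returns floats for i < 0, outside Pre_)
def hospitalsPrefIdP (i : Int) (p : Int) : Int :=
  let y := allHospitalsResponsivePreferencesP.2
  let base : Int := ((y.length : Nat) : Int)
  PySem.Int.floordiv (PySem.Int.mod p (base ^ (i + 1).toNat)) (base ^ i.toNat)

-- hospitalsPreferences_R(condition) = [x for x in allHPrange if condition(x)]
def hospitalsPreferencesP (condition : Int → Bool) : List Int :=
  (allHospitalsResponsivePreferencesP.1).foldl
    (fun acc x => if condition x then acc ++ [x] else acc) []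

def iVariantsForHospitals_R (i : Int) (p : Int) : List Int :=
  let y := allHospitalsResponsiveProfilesP.2
  let currpref := hospitalsPrefIdP i p
  let factor : Int := ((y.length : Nat) : Int) ^ i.toNat
  let rest := p - currpref * factor
  (hospitalsPreferencesP (fun newpref => newpref != currpref)).foldl
    (fun variants newpref => variants ++ [rest + newpref * factor]) []

-- ===== PORT B =====
-- 'for _ in range(i)' : i iterations (none for i < 0), so List.range i.toNat is exact
def iVariantsForHospitals_R_alt (i : Int) (p : Int) : List Int :=
  let s := (List.range i.toNat).foldl
    (fun (s : List Int × Int) _ => (s.1 ++ [PySem.Int.mod s.2 8], PySem.Int.floordiv s.2 8)) ([], p)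
  let lo := s.2 - PySem.Int.mod s.2 8
  let variants := (PySem.List.pyRange lo (lo + 8) 1).filter (fun v => v != s.2)
  s.1.reverse.foldl (fun vs d => vs.map (fun v => v * 8 + d)) variants

-- ===== PRECONDITION & SPEC =====
-- Pre_ excludes i < 0, where Python's 'base ** i' is a float and A returns a list of floats, not ints.
def Pre_iVariantsForHospitals_R (i : Int) (p : Int) : Prop := 0 ≤ i
instance (i : Int) (p : Int) : Decidable (Pre_iVariantsForHospitals_R i p) := by unfold Pre_iVariantsForHospitals_R; infer_instance
def pvWitness_iVariantsForHospitals_R : Int × Int := (0, 5)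

def Spec_iVariantsForHospitals_R (i : Int) (p : Int) (out : List Int) : Prop := out = iVariantsForHospitals_R_alt i p
instance (i : Int) (p : Int) (out : List Int) : Decidable (Spec_iVariantsForHospitals_R i p out) := by unfold Spec_iVariantsForHospitals_R; infer_instance

-- ===== CLAIM (what is proved, stated in full; the proofs are below) =====
def Claim_equal_iVariantsForHospitals_R : Prop := ∀ (i : Int) (p : Int), Dom_iVariantsForHospitals_R i p → Pre_iVariantsForHospitals_R i p → Spec_iVariantsForHospitals_R i p (iVariantsForHospitals_R i p)

-- ===== LEMMAS AND PROOFS =====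
-- the common closed form both ports are reduced to
def refW (n : Nat) (p : Int) : List Int :=
  ((PySem.List.pyRange 0 8 1).map
      (fun k => (p - PySem.Int.mod p (8 * 8 ^ n) + PySem.Int.mod p (8 ^ n)) + k * 8 ^ n)).filter
    (fun q => q != p)

-- A's responsive-preference machinery evaluates to the constant (range(8), [0,2,7,10,13,16,21,23])
lemma ahrp_eval : allHospitalsResponsivePreferencesP =
    (PySem.List.pyRange 0 8 1, [0, 2, 7, 10, 13, 16, 21, 23]) := by decide

lemma mod_mod_of_pos (p f : Int) (hf : 0 < f) :
    PySem.Int.mod (PySem.Int.mod p (8 * f)) f = PySem.Int.mod p f := by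
  rw [PySem.Int.mod_eq_emod_of_pos (show (0:Int) < 8 * f by linarith),
      PySem.Int.mod_eq_emod_of_pos hf, PySem.Int.mod_eq_emod_of_pos hf]
  exact Int.emod_emod_of_dvd p ⟨8, by ring⟩

lemma A_eq_ref (i p : Int) (hi : 0 ≤ i) : iVariantsForHospitals_R i p = refW i.toNat p := by
  unfold iVariantsForHospitals_R refW
    allHospitalsResponsiveProfilesP hospitalsPreferencesP hospitalsPrefIdP
  rw [ahrp_eval]
  have hlen8 : ((([0, 2, 7, 10, 13, 16, 21, 23] : List Int).length : Nat) : Int) = 8 := by decide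
  simp only [hlen8]
  have hn1 : (i + 1).toNat = i.toNat + 1 := by omega
  simp only [hn1]
  set n := i.toNat with hn
  set f : Int := (8 : Int) ^ n with hfdef
  have hf : 0 < f := by positivity
  have hpow : (8 : Int) ^ (n + 1) = 8 * f := by rw [hfdef]; ring
  simp only [hpow]
  set c : Int := PySem.Int.floordiv (PySem.Int.mod p (8 * f)) f with hc
  rw [PySem.List.foldl_append_if_eq_filter, PySem.List.foldl_append_singleton_eq_map,
      List.filter_map]
  have hr : p - PySem.Int.mod p (8 * f) + PySem.Int.mod p f = p - c * f := by
    have h1 := PySem.Int.floordiv_mul_add_mod (PySem.Int.mod p (8 * f)) f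
    have h2 := mod_mod_of_pos p f hf
    rw [hc]
    linarith
  rw [hr]
  simp only [List.nil_append]
  have hpred : ∀ x ∈ PySem.List.pyRange 0 8 1,
      (x != c) = ((fun q => q != p) ∘ fun k => p - c * f + k * f) x := by
    intro x _
    by_cases h : x = c
    · simp [Function.comp, h]
    · have hne : p - c * f + x * f ≠ p := fun hp =>
        h (mul_right_cancel₀ (ne_of_gt hf) (by linarith))
      show (x != c) = (p - c * f + x * f != p)
      rw [show (x != c) = true by simp [h], show (p - c * f + x * f != p) = true by simp [hne]]
  rw [List.filter_congr hpred]

-- ---- B side ----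
def gstep (s : List Int × Int) : List Int × Int :=
  (s.1 ++ [PySem.Int.mod s.2 8], PySem.Int.floordiv s.2 8)

lemma foldl_ign {α β : Type} (f : β → β) :
    ∀ (l : List α) (s : β), l.foldl (fun s _ => f s) s = f^[l.length] s
  | [], _ => rfl
  | _ :: t, s => by
      simp only [List.foldl_cons, List.length_cons, foldl_ign f t (f s),
        Function.iterate_succ_apply]

lemma gstep_iterate_append :
    ∀ (n : Nat) (a t : List Int) (q : Int),
      gstep^[n] (a ++ t, q) = (a ++ (gstep^[n] (t, q)).1, (gstep^[n] (t, q)).2)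
  | 0, a, t, q => rfl
  | n + 1, a, t, q => by
      rw [Function.iterate_succ_apply, Function.iterate_succ_apply]
      show gstep^[n] ((a ++ t) ++ [PySem.Int.mod q 8], _) = _
      rw [List.append_assoc]
      exact gstep_iterate_append n a (t ++ [PySem.Int.mod q 8]) (PySem.Int.floordiv q 8)

-- the body of B's port, with the iteration count made a Nat
def altBody (n : Nat) (p : Int) : List Int :=
  let s := gstep^[n] ([], p)
  let lo := s.2 - PySem.Int.mod s.2 8
  let variants := (PySem.List.pyRange lo (lo + 8) 1).filter (fun v => v != s.2)
  s.1.reverse.foldl (fun vs d => vs.map (fun v => v * 8 + d)) variants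

lemma alt_eq_altBody (i p : Int) : iVariantsForHospitals_R_alt i p = altBody i.toNat p := by
  unfold iVariantsForHospitals_R_alt altBody
  rw [show (fun (s : List Int × Int) (_ : Nat) =>
        (s.1 ++ [PySem.Int.mod s.2 8], PySem.Int.floordiv s.2 8)) = fun s _ => gstep s from rfl,
      foldl_ign gstep (List.range i.toNat) ([], p), List.length_range]

lemma altBody_succ (n : Nat) (p : Int) :
    altBody (n + 1) p =
      (altBody n (PySem.Int.floordiv p 8)).map (fun v => v * 8 + PySem.Int.mod p 8) := by
  unfold altBody
  rw [Function.iterate_succ_apply]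
  have hg : gstep (([] : List Int), p) = ([PySem.Int.mod p 8] ++ ([] : List Int), PySem.Int.floordiv p 8) := by
    simp [gstep]
  rw [hg, gstep_iterate_append n [PySem.Int.mod p 8] [] (PySem.Int.floordiv p 8)]
  simp only [List.reverse_append, List.reverse_cons, List.reverse_nil, List.nil_append,
    List.foldl_append, List.foldl_cons, List.foldl_nil]

lemma pyRange8_map (r : Int) :
    (PySem.List.pyRange 0 8 1).map (fun k => r + k) =
      PySem.List.pyRange r (r + 8) 1 := by
  rw [show PySem.List.pyRange 0 8 1 = [0, 1, 2, 3, 4, 5, 6, 7] from by decide]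
  rw [PySem.List.pyRange_one_cons (by omega), PySem.List.pyRange_one_cons (by omega),
      PySem.List.pyRange_one_cons (by omega), PySem.List.pyRange_one_cons (by omega),
      PySem.List.pyRange_one_cons (by omega), PySem.List.pyRange_one_cons (by omega),
      PySem.List.pyRange_one_cons (by omega), PySem.List.pyRange_one_cons (by omega),
      PySem.List.pyRange_one_eq_nil (by omega)]
  simp only [List.map_cons, List.map_nil]
  norm_num
  omega

-- Python floor-mod shift: (8*q + s) % (8*t) = 8*(q % t) + s for 0 ≤ s < 8, 0 < t
lemma mod_shift (q s t : Int) (ht : 0 < t) (hs0 : 0 ≤ s) (hs8 : s < 8) :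
    PySem.Int.mod (8 * q + s) (8 * t) = 8 * PySem.Int.mod q t + s := by
  rw [PySem.Int.mod_eq_emod_of_pos (show (0:Int) < 8 * t by linarith),
      PySem.Int.mod_eq_emod_of_pos ht]
  have hq : 8 * q + s = (8 * (q % t) + s) + (8 * t) * (q / t) := by
    have := Int.emod_add_ediv q t
    linarith
  rw [hq, Int.add_mul_emod_self_left]
  have h0 : 0 ≤ 8 * (q % t) + s := by
    have := Int.emod_nonneg q (ne_of_gt ht); linarith
  have h1 : 8 * (q % t) + s < 8 * t := by
    have := Int.emod_lt_of_pos q ht; linarith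
  exact Int.emod_eq_of_lt h0 h1

lemma ref_step (n : Nat) (p : Int) :
    (refW n (PySem.Int.floordiv p 8)).map (fun v => v * 8 + PySem.Int.mod p 8) =
      refW (n + 1) p := by
  unfold refW
  set f : Int := (8 : Int) ^ n with hfdef
  have hf : 0 < f := by positivity
  set q : Int := PySem.Int.floordiv p 8 with hq
  set s : Int := PySem.Int.mod p 8 with hs
  have hp : p = 8 * q + s := by
    have := PySem.Int.floordiv_mul_add_mod p 8
    rw [hq, hs]; linarith
  have hs0 : 0 ≤ s := by
    rw [hs, PySem.Int.mod_eq_emod_of_pos (by norm_num : (0:Int) < 8)]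
    exact Int.emod_nonneg p (by norm_num)
  have hs8 : s < 8 := by
    rw [hs, PySem.Int.mod_eq_emod_of_pos (by norm_num : (0:Int) < 8)]
    exact Int.emod_lt_of_pos p (by norm_num)
  have hpow1 : (8 : Int) ^ (n + 1) = 8 * f := by rw [hfdef]; ring
  rw [List.filter_map, List.map_map, hpow1]
  have hm1 : PySem.Int.mod p (8 * (8 * f)) = 8 * PySem.Int.mod q (8 * f) + s := by
    rw [hp, show 8 * (8 * f) = 8 * (8 * f) from rfl]
    exact mod_shift q s (8 * f) (by linarith) hs0 hs8
  have hm2 : PySem.Int.mod p (8 * f) = 8 * PySem.Int.mod q f + s := by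
    rw [hp]; exact mod_shift q s f hf hs0 hs8
  have hfun : ∀ k : Int,
      ((fun v => v * 8 + s) ∘ fun k => (q - PySem.Int.mod q (8 * f) + PySem.Int.mod q f) + k * f) k
        = (p - PySem.Int.mod p (8 * (8 * f)) + PySem.Int.mod p (8 * f)) + k * (8 * f) := by
    intro k
    simp only [Function.comp]
    rw [hm1, hm2, hp]; ring
  rw [List.map_congr_left (fun k _ => hfun k), List.filter_map]
  apply congrArg
  apply List.filter_congr
  intro k _
  have hfk := hfun k
  simp only [Function.comp] at hfk ⊢
  rw [← hfk]
  by_cases hv : q - PySem.Int.mod q (8 * f) + PySem.Int.mod q f + k * f = q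
  · rw [hv]
    have h2 : q * 8 + s = p := by linarith
    simp [h2]
  · have h2 : (q - PySem.Int.mod q (8 * f) + PySem.Int.mod q f + k * f) * 8 + s ≠ p := by
      intro hc
      apply hv
      linarith
    rw [show (q - PySem.Int.mod q (8 * f) + PySem.Int.mod q f + k * f != q) = true from by
          simp [hv],
        show ((q - PySem.Int.mod q (8 * f) + PySem.Int.mod q f + k * f) * 8 + s != p) = true from by
          simp [h2]]

lemma alt_eq_ref : ∀ (n : Nat) (p : Int), altBody n p = refW n p := by
  intro n
  induction n with
  | zero =>
      intro p
      unfold altBody refW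
      have hm1 : PySem.Int.mod p 1 = 0 := by
        rw [PySem.Int.mod_eq_emod_of_pos (by norm_num : (0:Int) < 1)]
        exact Int.emod_one p
      simp only [Function.iterate_zero, id_eq, List.reverse_nil, List.foldl_nil, pow_zero,
        mul_one, hm1, add_zero]
      rw [pyRange8_map]
  | succ n ih =>
      intro p
      rw [altBody_succ, ih, ref_step]

-- ===== VERDICT (by name: the statement is the Claim_ definition above) =====
theorem iVariantsForHospitals_R_spec : Claim_equal_iVariantsForHospitals_R := by
  intro i p _ hpre
  unfold Spec_iVariantsForHospitals_R
  rw [A_eq_ref i p hpre, alt_eq_altBody, alt_eq_ref]
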